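-- pv_equiv track=rewrite | github.com/santi2113/asembler | funcs.py | imm_loader
-- ===== SOURCE A (Python) =====
-- def imm_loader(imm, bitlen):
--     if imm.startswith("-"):
--         imm = imm[3:]
--         while len(imm) != bitlen and len(imm) < bitlen+1:
--             imm = "0" + imm
--         imm = ''.join('1' if bit == '0' else '0' for bit in imm)
--         imm = bin(int(imm,2)+1)[2:]
--         bin_0 = "1"
--     else:
--         imm = imm[2:]
--         while len(imm) != bitlen and len(imm) < bitlen+1:
--             imm = "0" + imm
--         bin_0 = "0"
--     imm_bits = list(imm)
--     return imm_bits, bin_0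
-- ===== SOURCE B (Python) =====
-- def imm_loader(imm, bitlen):
--     if not imm.startswith("-"):
--         return list(imm[2:].rjust(bitlen, "0")), "0"
--     p = imm[3:].rjust(bitlen, "0")
--     core = p.rstrip("0")          # trailing zero chars are unchanged by the +1 carry
--     if not core:                  # all-zero magnitude: the carry overflows one place left
--         return list("1" + "0" * len(p)), "1"
--     trailing = "0" * (len(p) - len(core))
--     bits = "".join("1" if c == "0" else "0" for c in core[:-1]) + "1" + trailing
--     return list(bits.lstrip("0")), "1"
-- ===== Notes on version B (the rewrite author's own statement) =====
-- stated objective: alternative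
-- what changed: B never converts the string to an integer: instead of A's invert-every-bit comprehension followed by int(...,2), +1 and bin()[2:], B pads once with rjust and applies the textual two's-complement trick - keep the trailing run of zero chars, set the pivot to '1', flip only the prefix before it, and strip leading zeros.
import Mathlib
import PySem

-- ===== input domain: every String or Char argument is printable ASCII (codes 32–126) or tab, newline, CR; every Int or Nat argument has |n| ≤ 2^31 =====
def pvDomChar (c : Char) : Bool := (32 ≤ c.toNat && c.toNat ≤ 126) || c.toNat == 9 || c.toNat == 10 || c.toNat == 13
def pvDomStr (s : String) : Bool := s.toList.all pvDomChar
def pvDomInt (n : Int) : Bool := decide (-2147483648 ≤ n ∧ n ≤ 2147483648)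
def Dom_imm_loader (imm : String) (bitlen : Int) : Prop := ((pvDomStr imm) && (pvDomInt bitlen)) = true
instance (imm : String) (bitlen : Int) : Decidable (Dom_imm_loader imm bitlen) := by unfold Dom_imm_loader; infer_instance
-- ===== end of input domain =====

-- B replaces A's invert-all-bits + int() + add-one + bin() numeric round-trip with the textual
-- two's-complement trick (keep trailing zeros, pivot '1', flip the prefix) — no integer conversion
-- at all (objective: alternative).

-- ===== PORT A =====

-- A's while loop: prepend '0' while len != bitlen and len < bitlen+1
def pvPad (s : List Char) (bitlen : Int) : List Char :=
  if (s.length : Int) ≠ bitlen ∧ (s.length : Int) < bitlen + 1 then pvPad ('0' :: s) bitlen else s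
termination_by (bitlen + 1 - (s.length : Int)).toNat
decreasing_by simp only [List.length_cons]; omega

-- the genexp's per-character translation: '1' if bit == '0' else '0'
def pvInv (c : Char) : Char := if c = '0' then '1' else '0'

-- int(s, 2), exact on '0'/'1' digit strings and on the empty string (ValueError = none);
-- the only strings reaching it in A are outputs of the inversion map, which are of that form
def pvParseBinAux : List Char → Nat → Option Nat
  | [], acc => some acc
  | c :: rest, acc =>
      if c = '0' then pvParseBinAux rest (2 * acc)
      else if c = '1' then pvParseBinAux rest (2 * acc + 1)
      else none

def pvParseBin? (l : List Char) : Option Nat := if l = [] then none else pvParseBinAux l 0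

-- bin(n)[2:] for n ≥ 1 (exact there; A only applies it to n+1 ≥ 1)
def pvBin (n : Nat) : List Char :=
  if n < 2 then [if n = 1 then '1' else '0']
  else pvBin (n / 2) ++ [if n % 2 = 1 then '1' else '0']
termination_by n
decreasing_by omega

def imm_loader (imm : String) (bitlen : Int) : List String × String :=
  if PySem.Str.startswith imm "-" then
    let m := PySem.List.slice imm.toList (some 3) none
    let p := pvPad m bitlen
    let inv := p.map pvInv
    let n := (pvParseBin? inv).getD 0   -- none = ValueError, excluded by Pre_
    let bits := pvBin (n + 1)           -- bin(n+1)[2:]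
    (bits.map (fun c => String.ofList [c]), "1")
  else
    let p := pvPad (PySem.List.slice imm.toList (some 2) none) bitlen
    (p.map (fun c => String.ofList [c]), "0")

-- ===== PORT B =====

-- str.rjust(w, '0'): left-pad with '0' to width w (no-op if w ≤ len)
def pvRjust (l : List Char) (w : Int) : List Char := List.replicate (w - l.length).toNat '0' ++ l

-- s.rstrip("0") / s.lstrip("0"), exact: drop the maximal run of '0' chars on that side
def pvStripTrailing0 (l : List Char) : List Char := (l.reverse.dropWhile (· == '0')).reverse
def pvLstrip0 (l : List Char) : List Char := l.dropWhile (· == '0')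

-- Source B's comprehension: '1' if c == '0' else '0'
def pvInvB (c : Char) : Char := if c = '0' then '1' else '0'

def imm_loader_alt (imm : String) (bitlen : Int) : List String × String :=
  if PySem.Str.startswith imm "-" then
    let p := pvRjust (PySem.List.slice imm.toList (some 3) none) bitlen
    let core := pvStripTrailing0 p
    if core = [] then
      (('1' :: List.replicate p.length '0').map (fun c => String.ofList [c]), "1")
    else
      let bits := pvLstrip0 (core.dropLast.map pvInvB ++ '1' :: List.replicate (p.length - core.length) '0')
      (bits.map (fun c => String.ofList [c]), "1")
  else
    ((pvRjust (PySem.List.slice imm.toList (some 2) none) bitlen).map (fun c => String.ofList [c]), "0")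

-- ===== PRECONDITION & SPEC =====
-- Pre_ excludes only the inputs where A raises ValueError (int('',2)): imm starts with '-' and the
-- stripped magnitude is empty with no padding requested (len(imm) ≤ 3 and bitlen ≤ 0).
def Pre_imm_loader (imm : String) (bitlen : Int) : Prop :=
  PySem.Str.startswith imm "-" = true → (3 < imm.toList.length ∨ 1 ≤ bitlen)
instance (imm : String) (bitlen : Int) : Decidable (Pre_imm_loader imm bitlen) := by
  unfold Pre_imm_loader; infer_instance

def pvWitness_imm_loader : String × Int := ("-0b101", 8)

def Spec_imm_loader (imm : String) (bitlen : Int) (out : List String × String) : Prop := out = imm_loader_alt imm bitlen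
instance (imm : String) (bitlen : Int) (out : List String × String) : Decidable (Spec_imm_loader imm bitlen out) := by unfold Spec_imm_loader; infer_instance

-- ===== CLAIM (what is proved, stated in full; the proofs are below) =====
def Claim_equal_imm_loader : Prop := ∀ (imm : String) (bitlen : Int), Dom_imm_loader imm bitlen → Pre_imm_loader imm bitlen → Spec_imm_loader imm bitlen (imm_loader imm bitlen)

-- ===== LEMMAS AND PROOFS =====

-- the value A parses: binary fold with A's inverted bit ('0' ↦ 1, anything else ↦ 0)
def pvStep (a : Nat) (c : Char) : Nat := 2 * a + (if c = '0' then 1 else 0)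

-- A's padding loop is exactly B's rjust
theorem pvPad_eq_rjust (s : List Char) (bitlen : Int) :
    pvPad s bitlen = pvRjust s bitlen := by
  fun_induction pvPad s bitlen with
  | case1 s h ih =>
      rw [ih]
      unfold pvRjust
      simp only [List.length_cons]
      have hlt : (s.length : Int) < bitlen := by omega
      have : (bitlen - s.length).toNat = (bitlen - (s.length + 1)).toNat + 1 := by omega
      rw [this, List.replicate_succ']
      simp
  | case2 s h =>
      unfold pvRjust
      have : (bitlen - s.length).toNat = 0 := by omega
      simp [this]

-- parsing the inverted string succeeds and equals the fold
theorem parse_inv (l : List Char) (acc : Nat) :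
    pvParseBinAux (l.map pvInv) acc = some (l.foldl pvStep acc) := by
  induction l generalizing acc with
  | nil => simp [pvParseBinAux]
  | cons c rest ih =>
      by_cases hc : c = '0' <;> simp [pvParseBinAux, pvInv, pvStep, hc, ih]

theorem pvBin_ne_nil (n : Nat) : pvBin n ≠ [] := by
  rw [pvBin]; split <;> simp

theorem pvBin_two_mul (n : Nat) (h : 1 ≤ n) : pvBin (2 * n) = pvBin n ++ ['0'] := by
  rw [pvBin]
  have h1 : ¬ (2 * n < 2) := by omega
  have h2 : 2 * n / 2 = n := by omega
  have h3 : 2 * n % 2 = 0 := by omega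
  simp [h1, h2, h3]

theorem pvBin_two_mul_add_one (n : Nat) (h : 1 ≤ n) :
    pvBin (2 * n + 1) = pvBin n ++ ['1'] := by
  rw [pvBin]
  have h1 : ¬ (2 * n + 1 < 2) := by omega
  have h2 : (2 * n + 1) / 2 = n := by omega
  have h3 : (2 * n + 1) % 2 = 1 := by omega
  simp [h1, h2, h3]

theorem pvBin_mul_pow (m t : Nat) (h : 1 ≤ m) :
    pvBin (m * 2 ^ t) = pvBin m ++ List.replicate t '0' := by
  induction t with
  | zero => simp
  | succ t ih =>
      have hmt : 1 ≤ m * 2 ^ t := Nat.one_le_iff_ne_zero.mpr (by positivity)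
      have : m * 2 ^ (t + 1) = 2 * (m * 2 ^ t) := by ring
      rw [this, pvBin_two_mul _ hmt, ih, List.replicate_succ', List.append_assoc]

theorem fold_zeros (t : Nat) (a : Nat) :
    List.foldl pvStep a (List.replicate t '0') = (a + 1) * 2 ^ t - 1 := by
  induction t generalizing a with
  | zero => simp
  | succ t ih =>
      rw [List.replicate_succ, List.foldl_cons, ih]
      have : pvStep a '0' = 2 * a + 1 := by simp [pvStep]
      rw [this]
      have h1 : 1 ≤ (a + 1) * 2 ^ t := Nat.one_le_iff_ne_zero.mpr (by positivity)
      have : (a + 1) * 2 ^ (t + 1) = ((2 * a + 1) + 1) * 2 ^ t := by ring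
      omega

-- canonical form: stripping leading zeros of the inverted string is pvBin of its value
theorem canon (q : List Char) :
    pvLstrip0 (q.map pvInvB) =
      if q.foldl pvStep 0 = 0 then [] else pvBin (q.foldl pvStep 0) := by
  induction q using List.reverseRecOn with
  | nil => simp [pvLstrip0]
  | append_singleton q c ih =>
      rw [List.map_append, List.foldl_append]
      simp only [List.map_cons, List.map_nil, List.foldl_cons, List.foldl_nil]
      unfold pvLstrip0 at *
      rw [List.dropWhile_append]
      by_cases hv : q.foldl pvStep 0 = 0
      · rw [ih]
        simp only [hv, if_pos, List.isEmpty_nil]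
        by_cases hc : c = '0'
        · simp [hc, pvInvB, pvStep, pvBin]
        · simp [hc, pvInvB, pvStep]
      · rw [ih]
        simp only [hv, if_neg, not_false_eq_true]
        have hne : (pvBin (q.foldl pvStep 0)).isEmpty = false := by
          simp [pvBin_ne_nil]
        rw [if_neg (by simp [hne])]
        have h1 : 1 ≤ q.foldl pvStep 0 := Nat.one_le_iff_ne_zero.mpr hv
        by_cases hc : c = '0'
        · have hstep : pvStep (q.foldl pvStep 0) c = 2 * (q.foldl pvStep 0) + 1 := by
            simp [pvStep, hc]
          rw [hstep, if_neg (by omega), pvBin_two_mul_add_one _ h1]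
          simp [pvInvB, hc]
        · have hstep : pvStep (q.foldl pvStep 0) c = 2 * (q.foldl pvStep 0) := by
            simp [pvStep, hc]
          rw [hstep, if_neg (by omega), pvBin_two_mul _ h1]
          simp [pvInvB, hc]

-- a takeWhile (== '0') run is a replicate of '0'
theorem takeWhile_zeros (l : List Char) :
    l.takeWhile (· == '0') = List.replicate (l.takeWhile (· == '0')).length '0' := by
  induction l with
  | nil => simp
  | cons c rest ih =>
      by_cases hc : c = '0'
      · subst hc
        simp only [List.takeWhile_cons, BEq.rfl]
        exact congrArg _ ih
      · have hb : (c == '0') = false := by simp [hc]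
        simp [hb]

-- decomposition: p = (rstrip "0" of p) ++ trailing zeros
theorem strip_decomp (p : List Char) :
    ∃ t, p = pvStripTrailing0 p ++ List.replicate t '0' ∧
      p.length = (pvStripTrailing0 p).length + t := by
  refine ⟨(p.reverse.takeWhile (· == '0')).length, ?_, ?_⟩
  · unfold pvStripTrailing0
    conv_lhs => rw [← List.reverse_reverse p,
      ← List.takeWhile_append_dropWhile (p := (· == '0')) (l := p.reverse)]
    rw [List.reverse_append]
    congr 1
    conv_lhs => rw [takeWhile_zeros p.reverse]
    rw [List.reverse_replicate]
  · unfold pvStripTrailing0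
    have hl : p.length =
        (p.reverse.takeWhile (· == '0')).length + (p.reverse.dropWhile (· == '0')).length := by
      have h := congrArg List.length
        (List.takeWhile_append_dropWhile (p := (· == '0')) (l := p.reverse))
      simp only [List.length_append, List.length_reverse] at h
      omega
    simp only [List.length_reverse]
    omega

-- the result of dropWhile is empty or starts with a character failing the predicate
theorem dropWhile_head (l : List Char) :
    l.dropWhile (· == '0') = [] ∨
      ∃ c rest, l.dropWhile (· == '0') = c :: rest ∧ (c == '0') = false := by
  induction l with
  | nil => simp
  | cons c rest ih =>
      by_cases hc : c = '0'
      · simpa [hc] using ih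
      · have hb : (c == '0') = false := by simp [hc]
        exact Or.inr ⟨c, rest, by simp [hb], hb⟩

theorem pvBin_one : pvBin 1 = ['1'] := by rw [pvBin]; norm_num

-- core negative-branch identity: pvBin (value + 1) is B's textual two's complement
theorem neg_core (p : List Char) :
    pvBin (p.foldl pvStep 0 + 1) =
      (if pvStripTrailing0 p = [] then '1' :: List.replicate p.length '0'
       else pvLstrip0 ((pvStripTrailing0 p).dropLast.map pvInvB ++
              '1' :: List.replicate (p.length - (pvStripTrailing0 p).length) '0')) := by
  obtain ⟨t, hdec, hlen⟩ := strip_decomp p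
  rcases dropWhile_head p.reverse with hnil | ⟨c, rest, hcr, hc0⟩
  · -- core empty: p is all zeros
    have hcore : pvStripTrailing0 p = [] := by unfold pvStripTrailing0; rw [hnil]; rfl
    rw [if_pos hcore]
    rw [hcore] at hdec hlen
    simp only [List.nil_append, List.length_nil, Nat.zero_add] at hdec hlen
    have hv : p.foldl pvStep 0 = 2 ^ t - 1 := by
      rw [hdec, fold_zeros]; norm_num
    have h1 : 1 ≤ 2 ^ t := Nat.one_le_two_pow
    have hstep : p.foldl pvStep 0 + 1 = 1 * 2 ^ t := by omega
    rw [hstep, pvBin_mul_pow 1 t le_rfl, pvBin_one, hlen]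
    rfl
  · -- core ends in a non-'0' character c
    have hcore : pvStripTrailing0 p = rest.reverse ++ [c] := by
      unfold pvStripTrailing0; rw [hcr]; simp
    rw [hcore] at hdec hlen ⊢
    rw [if_neg (by simp)]
    have hdl : (rest.reverse ++ [c]).dropLast = rest.reverse := by simp
    rw [hdl]
    have hT : p.length - (rest.reverse ++ [c]).length = t := by
      simp only [List.length_append, List.length_reverse, List.length_cons,
        List.length_nil] at hlen ⊢
      omega
    rw [hT]
    have hfold : p.foldl pvStep 0 = (2 * (rest.reverse.foldl pvStep 0) + 1) * 2 ^ t - 1 := by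
      rw [hdec, List.foldl_append, List.foldl_append]
      simp only [List.foldl_cons, List.foldl_nil]
      have hstep : pvStep (rest.reverse.foldl pvStep 0) c = 2 * (rest.reverse.foldl pvStep 0) := by
        have : ¬ (c = '0') := by simpa using hc0
        simp [pvStep, this]
      rw [hstep, fold_zeros]
    set vq := rest.reverse.foldl pvStep 0 with hvq
    have h2t : 1 ≤ 2 ^ t := Nat.one_le_two_pow
    have hplus : p.foldl pvStep 0 + 1 = (2 * vq + 1) * 2 ^ t := by
      have : 1 ≤ (2 * vq + 1) * 2 ^ t := Nat.one_le_iff_ne_zero.mpr (by positivity)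
      omega
    rw [hplus, pvBin_mul_pow _ t (by omega)]
    unfold pvLstrip0
    rw [List.dropWhile_append]
    have hpiv : List.dropWhile (· == '0') ('1' :: List.replicate t '0') =
        '1' :: List.replicate t '0' := by
      simp
    have hcanon := canon rest.reverse
    unfold pvLstrip0 at hcanon
    by_cases hv : vq = 0
    · rw [hcanon]
      simp only [← hvq, hv, if_pos, List.isEmpty_nil, hpiv]
      simp [pvBin_one]
    · rw [hcanon]
      simp only [← hvq, hv, if_neg, not_false_eq_true]
      have hne : (pvBin vq).isEmpty = false := by simp [pvBin_ne_nil]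
      rw [if_neg (by simp [hne]), pvBin_two_mul_add_one _ (Nat.one_le_iff_ne_zero.mpr hv)]
      simp

theorem imm_loader_spec : Claim_equal_imm_loader := by
  intro imm bitlen _hdom hpre
  unfold Spec_imm_loader imm_loader imm_loader_alt
  by_cases hs : PySem.Str.startswith imm "-" = true
  · simp only [hs, if_pos]
    have h3 : PySem.List.slice imm.toList (some 3) none = imm.toList.drop 3 := by
      have := PySem.List.slice_from_natCast imm.toList 3
      simpa using this
    rw [h3, pvPad_eq_rjust]
    set p := pvRjust (imm.toList.drop 3) bitlen with hp
    have hpos : 0 < p.length := by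
      have := hpre hs
      rw [hp]; unfold pvRjust
      simp only [List.length_append, List.length_replicate, List.length_drop]
      omega
    have hpne : p ≠ [] := by
      intro h; rw [h] at hpos; simp at hpos
    have hmapne : p.map pvInv ≠ [] := by simp [hpne]
    unfold pvParseBin?
    rw [if_neg hmapne, parse_inv, Option.getD_some, neg_core p]
    split <;> rfl
  · simp only [hs, if_neg, Bool.false_eq_true, not_false_eq_true]
    rw [pvPad_eq_rjust]
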